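-- pv_equiv track=rewrite | github.com/anddtran/Distance-ADI | osm_geocoding/scripts/osm_geocoder.py | _extract_address_tags
-- ===== SOURCE A (Python) =====
-- from typing import Dict, List, Optional, Tuple, Union
--
-- def _extract_address_tags(tags) -> Dict[str, str]:
--     """Extract address-related tags from OSM element."""
--     addr_tags = {}
--
--     # Standard address tags
--     for key in ['addr:housenumber', 'addr:street', 'addr:city',
--                'addr:state', 'addr:postcode']:
--         if key in tags:
--             clean_key = key.replace('addr:', '')
--             addr_tags[clean_key] = tags[key].upper() if clean_key != 'housenumber' else tags[key]
--
--     return addr_tags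
-- ===== SOURCE B (Python) =====
-- # B: single pass over tags.items() (instead of scanning a fixed key list against the dict),
-- # collecting matches through a key->stripped-name map, then emitting in canonical order.
-- _ADDR_KEYS = {
--     'addr:housenumber': 'housenumber',
--     'addr:street': 'street',
--     'addr:city': 'city',
--     'addr:state': 'state',
--     'addr:postcode': 'postcode',
-- }
-- _ORDER = ('housenumber', 'street', 'city', 'state', 'postcode')
--
-- def _extract_address_tags(tags):
--     found = {}
--     for key, val in tags.items():
--         name = _ADDR_KEYS.get(key)
--         if name is not None and name not in found:
--             found[name] = val if name == 'housenumber' else val.upper()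
--     return {name: found[name] for name in _ORDER if name in found}
-- ===== Notes on version B (the rewrite author's own statement) =====
-- stated objective: alternative
-- what changed: B makes one pass over tags.items() collecting matches via a full-key-to-stripped-name map, then assembles the result in canonical key order, instead of A's scan of a fixed key list with a membership test and lookup into tags per key.
import Mathlib
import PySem

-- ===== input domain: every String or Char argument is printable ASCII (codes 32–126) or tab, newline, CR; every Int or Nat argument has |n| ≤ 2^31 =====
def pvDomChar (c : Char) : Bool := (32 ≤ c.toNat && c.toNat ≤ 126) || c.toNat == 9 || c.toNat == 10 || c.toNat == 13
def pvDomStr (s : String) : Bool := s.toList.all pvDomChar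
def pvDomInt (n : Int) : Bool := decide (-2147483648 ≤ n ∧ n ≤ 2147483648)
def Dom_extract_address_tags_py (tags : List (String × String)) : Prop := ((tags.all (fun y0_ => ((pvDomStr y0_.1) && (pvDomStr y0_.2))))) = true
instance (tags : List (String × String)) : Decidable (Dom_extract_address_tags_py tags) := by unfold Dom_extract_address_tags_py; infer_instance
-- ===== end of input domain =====

-- B rewrites A as a single pass over tags with a key→name map, then emission in canonical
-- order (objective: alternative decomposition, same observable result).

-- ===== PORT A =====
-- the fixed key list A scans
def pvKeysA : List String :=
  ["addr:housenumber", "addr:street", "addr:city", "addr:state", "addr:postcode"]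

def extract_address_tags_py (tags : List (String × String)) : List (String × String) :=
  let t := PySem.Dict.mk tags
  (pvKeysA.foldl (fun addr_tags key =>
    match PySem.Dict.get? t key with      -- 'key in tags' guard + 'tags[key]' lookup
    | some v =>
        let clean_key := PySem.Str.replace key "addr:" ""
        PySem.Dict.insert addr_tags clean_key
          (if clean_key != "housenumber" then PySem.Str.upper v else v)
    | none => addr_tags) (PySem.Dict.mk [])).items

-- ===== PORT B =====
def pvAddrMap : List (String × String) :=
  [("addr:housenumber", "housenumber"), ("addr:street", "street"), ("addr:city", "city"),
   ("addr:state", "state"), ("addr:postcode", "postcode")]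

def pvOrder : List String := ["housenumber", "street", "city", "state", "postcode"]

-- loop body of B's single pass ('for key, val in tags.items(): …')
def pvStepB (found : PySem.Dict String String) (kv : String × String) : PySem.Dict String String :=
  match PySem.Dict.get? (PySem.Dict.mk pvAddrMap) kv.1 with
  | some name =>
      if PySem.Dict.contains found name then found
      else PySem.Dict.insert found name
        (if name == "housenumber" then kv.2 else PySem.Str.upper kv.2)
  | none => found

def extract_address_tags_py_alt (tags : List (String × String)) : List (String × String) :=
  let found := tags.foldl pvStepB (PySem.Dict.mk [])
  ((pvOrder.foldl (fun out name =>
    match PySem.Dict.get? found name with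
    | some v => PySem.Dict.insert out name v
    | none => out) (PySem.Dict.mk [])) : PySem.Dict String String).items

-- ===== PRECONDITION & SPEC =====
def Spec_extract_address_tags_py (tags : List (String × String)) (out : List (String × String)) : Prop := out = extract_address_tags_py_alt tags
instance (tags : List (String × String)) (out : List (String × String)) : Decidable (Spec_extract_address_tags_py tags out) := by unfold Spec_extract_address_tags_py; infer_instance

-- ===== CLAIM (what is proved, stated in full; the proofs are below) =====
def Claim_equal_extract_address_tags_py : Prop := ∀ (tags : List (String × String)), Dom_extract_address_tags_py tags → Spec_extract_address_tags_py tags (extract_address_tags_py tags)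

-- ===== LEMMAS AND PROOFS =====

-- what B's pass records for a name n (with full key `full`): the first value tags holds at `full`, transformed
theorem pv_found_get (tags : List (String × String)) (acc : PySem.Dict String String)
    (full n : String) (hfn : (full, n) ∈ pvAddrMap) :
    PySem.Dict.get? (tags.foldl pvStepB acc) n =
      Option.or (PySem.Dict.get? acc n)
        ((PySem.Dict.get? (PySem.Dict.mk tags) full).map
          (fun v => if n == "housenumber" then v else PySem.Str.upper v)) := by
  induction tags generalizing acc with
  | nil => simp [PySem.Dict.get?]
  | cons kv rest ih =>
    rcases kv with ⟨k, v⟩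
    rcases hk : PySem.Dict.get? (PySem.Dict.mk pvAddrMap) k with _ | m
    · have hkne : (k == full) = false := by
        by_contra hcon
        have hkf : k = full := by simpa using (eq_true_of_ne_false hcon)
        subst hkf
        fin_cases hfn <;> simp [pvAddrMap, PySem.Dict.get?_mk_cons] at hk
      simp only [List.foldl_cons, pvStepB, hk]
      rw [ih acc]
      simp [PySem.Dict.get?_mk_cons, hkne]
    · have hkmem : (k, m) ∈ pvAddrMap :=
        PySem.Dict.mem_items_of_get?_eq_some _ hk
      simp only [List.foldl_cons, pvStepB, hk]
      by_cases hkf : k = full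
      · subst hkf
        have hmn : m = n := by fin_cases hfn <;> simp_all [pvAddrMap]
        subst hmn
        rw [ih]
        simp only [PySem.Dict.get?_mk_cons, BEq.rfl]
        by_cases hc : PySem.Dict.contains acc m
        · rcases hsome : PySem.Dict.get? acc m with _ | w
          · rw [PySem.Dict.contains_eq_isSome_get?, hsome] at hc; simp at hc
          · simp [hc, hsome]
        · have hnone : PySem.Dict.get? acc m = none := by
            rw [PySem.Dict.contains_eq_isSome_get?] at hc
            cases h : PySem.Dict.get? acc m <;> simp_all
          simp [hc, PySem.Dict.get?_insert_self, hnone]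
      · have hmne : m ≠ n := by
          intro he; subst he
          apply hkf
          fin_cases hfn <;> simp_all [pvAddrMap]
        have hkne : (k == full) = false := by simp [hkf]
        by_cases hc : PySem.Dict.contains acc m
        · rw [if_pos hc, ih acc]
          simp [PySem.Dict.get?_mk_cons, hkne]
        · rw [if_neg hc, ih]
          rw [PySem.Dict.get?_insert_of_ne _ _ (Ne.symm hmne)]
          simp [PySem.Dict.get?_mk_cons, hkne]

-- evaluating PySem.Str.replace on the five literal keys
theorem pv_clean₁ : PySem.Str.replace "addr:housenumber" "addr:" "" = "housenumber" := by decide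
theorem pv_clean₂ : PySem.Str.replace "addr:street" "addr:" "" = "street" := by decide
theorem pv_clean₃ : PySem.Str.replace "addr:city" "addr:" "" = "city" := by decide
theorem pv_clean₄ : PySem.Str.replace "addr:state" "addr:" "" = "state" := by decide
theorem pv_clean₅ : PySem.Str.replace "addr:postcode" "addr:" "" = "postcode" := by decide

-- ===== VERDICT (by name: the statement is the Claim_ definition above) =====
theorem extract_address_tags_py_spec : Claim_equal_extract_address_tags_py := by
  intro tags _
  unfold Spec_extract_address_tags_py extract_address_tags_py extract_address_tags_py_alt
  have h₁ := pv_found_get tags (PySem.Dict.mk []) "addr:housenumber" "housenumber" (by decide)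
  have h₂ := pv_found_get tags (PySem.Dict.mk []) "addr:street" "street" (by decide)
  have h₃ := pv_found_get tags (PySem.Dict.mk []) "addr:city" "city" (by decide)
  have h₄ := pv_found_get tags (PySem.Dict.mk []) "addr:state" "state" (by decide)
  have h₅ := pv_found_get tags (PySem.Dict.mk []) "addr:postcode" "postcode" (by decide)
  simp only [pvKeysA, pvOrder, List.foldl_cons, List.foldl_nil,
    pv_clean₁, pv_clean₂, pv_clean₃, pv_clean₄, pv_clean₅, h₁, h₂, h₃, h₄, h₅]
  rcases o₁ : PySem.Dict.get? (PySem.Dict.mk tags) "addr:housenumber" with _ | v₁ <;>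
  rcases o₂ : PySem.Dict.get? (PySem.Dict.mk tags) "addr:street" with _ | v₂ <;>
  rcases o₃ : PySem.Dict.get? (PySem.Dict.mk tags) "addr:city" with _ | v₃ <;>
  rcases o₄ : PySem.Dict.get? (PySem.Dict.mk tags) "addr:state" with _ | v₄ <;>
  rcases o₅ : PySem.Dict.get? (PySem.Dict.mk tags) "addr:postcode" with _ | v₅ <;>
    rfl
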